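-- pv_equiv track=rewrite | github.com/socrammol/lista_palavras | teste.py | verifica_frequencia
-- ===== SOURCE A (Python) =====
-- def verifica_frequencia(arr1,arr2):
--     vetores_palavras = arr1
--     vet_final = arr2
--     vet1 = []
--     vet2 = []
--     for m in vetores_palavras:
--         palavras_sem_stopwords = m
--         contador = []
--         for i in range(0, len(vet_final), 1):
--             aux1 = vet_final[i]
--             for j in range(0, len(palavras_sem_stopwords), 1):
--                 aux2 = palavras_sem_stopwords[j]
--                 if aux1 == aux2:
--                     contador.append(1)
--             vet1.append(sum(contador))
--             contador = []
--         vet2.append(vet1)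
--         vet1 = []
--     return vet2
-- ===== SOURCE B (Python) =====
-- def verifica_frequencia(arr1, arr2):
--     result = []
--     for doc in arr1:
--         freq = {}
--         for w in doc:
--             freq[w] = freq.get(w, 0) + 1
--         result.append([freq.get(t, 0) for t in arr2])
--     return result
-- ===== Notes on version B (the rewrite author's own statement) =====
-- stated objective: faster
-- what changed: B builds a per-document frequency dictionary in one pass and then looks each target word up, instead of rescanning the whole document once per target word.
import Mathlib
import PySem

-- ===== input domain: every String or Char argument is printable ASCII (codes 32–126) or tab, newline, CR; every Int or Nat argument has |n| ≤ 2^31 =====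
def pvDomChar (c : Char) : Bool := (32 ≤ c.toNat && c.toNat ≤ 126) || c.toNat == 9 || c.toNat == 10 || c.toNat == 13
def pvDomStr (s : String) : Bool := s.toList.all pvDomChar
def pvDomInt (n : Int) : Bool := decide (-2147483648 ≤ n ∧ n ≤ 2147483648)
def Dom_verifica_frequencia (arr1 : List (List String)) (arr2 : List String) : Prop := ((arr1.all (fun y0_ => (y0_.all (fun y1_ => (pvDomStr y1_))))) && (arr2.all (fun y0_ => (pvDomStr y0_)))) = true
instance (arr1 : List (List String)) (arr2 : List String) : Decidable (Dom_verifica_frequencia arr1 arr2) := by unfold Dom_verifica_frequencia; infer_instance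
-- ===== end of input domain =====

-- B replaces A's per-target rescans of each document by a single frequency-dictionary pass per document (objective: faster).

-- ===== PORT A =====
def verifica_frequencia (arr1 : List (List String)) (arr2 : List String) : List (List Int) :=
  arr1.foldl (fun vet2 m =>
    let vet1 := (PySem.List.pyRange 0 (arr2.length : Int) 1).foldl (fun vet1 i =>
      let aux1 := PySem.List.pyGetD arr2 i ""
      let contador := (PySem.List.pyRange 0 (m.length : Int) 1).foldl (fun contador j =>
        let aux2 := PySem.List.pyGetD m j ""
        if aux1 == aux2 then contador ++ [(1 : Int)] else contador) []
      vet1 ++ [contador.sum]) []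
    vet2 ++ [vet1]) []

-- ===== PORT B =====
def verifica_frequencia_alt (arr1 : List (List String)) (arr2 : List String) : List (List Int) :=
  arr1.foldl (fun result doc =>
    let freq : PySem.Dict String Int := doc.foldl (fun d w => d.insert w (d.getD w 0 + 1)) PySem.Dict.empty
    result ++ [arr2.map (fun t => freq.getD t 0)]) []

-- ===== PRECONDITION & SPEC =====
def Spec_verifica_frequencia (arr1 : List (List String)) (arr2 : List String) (out : List (List Int)) : Prop := out = verifica_frequencia_alt arr1 arr2
instance (arr1 : List (List String)) (arr2 : List String) (out : List (List Int)) : Decidable (Spec_verifica_frequencia arr1 arr2 out) := by unfold Spec_verifica_frequencia; infer_instance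

-- ===== CLAIM (what is proved, stated in full; the proofs are below) =====
def Claim_equal_verifica_frequencia : Prop := ∀ (arr1 : List (List String)) (arr2 : List String), Dom_verifica_frequencia arr1 arr2 → Spec_verifica_frequencia arr1 arr2 (verifica_frequencia arr1 arr2)

-- ===== LEMMAS AND PROOFS =====

-- A's innermost loop: appending a 1 per match and summing counts aux1's occurrences in m.
lemma inner_count (m : List String) (aux1 : String) :
    (m.foldl (fun contador aux2 => if aux1 == aux2 then contador ++ [(1 : Int)] else contador) []).sum
      = (m.count aux1 : Int) := by
  rw [PySem.List.foldl_append_if (p := fun aux2 => aux1 == aux2) (f := fun _ => (1 : Int))]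
  simp [List.count_eq_countP, List.countP_eq_length_filter, BEq.comm]

-- A's per-document value (as simp's foldl_append_singleton_eq_map leaves it) is the count vector.
lemma a_doc (m : List String) (arr2 : List String) :
    ((PySem.List.pyRange 0 (arr2.length : Int) 1).map (fun x =>
      ((PySem.List.pyRange 0 (m.length : Int) 1).foldl (fun contador j =>
        if PySem.List.pyGetD arr2 x "" == PySem.List.pyGetD m j "" then contador ++ [(1 : Int)]
        else contador) []).sum))
    = arr2.map (fun t => (m.count t : Int)) := by
  conv_rhs => rw [← PySem.List.map_pyGetD_pyRange_zero' arr2 "", List.map_map]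
  apply List.map_congr_left
  intro x _
  simp only [Function.comp]
  rw [PySem.List.foldl_pyRange_zero_pyGetD' m ""
        (f := fun contador aux2 => if PySem.List.pyGetD arr2 x "" == aux2 then contador ++ [(1 : Int)] else contador)]
  exact inner_count m _

-- B's per-document value: the one-pass dictionary is Counter(doc), whose lookups are counts.
lemma b_doc (doc : List String) (arr2 : List String) :
    arr2.map (fun t => (doc.foldl (fun d w => d.insert w (d.getD w 0 + 1)) PySem.Dict.empty).getD t 0)
      = arr2.map (fun t => (doc.count t : Int)) := by
  apply List.map_congr_left
  intro t _
  rw [PySem.Dict.foldl_insert_getD_add_one_eq_counter, PySem.Dict.getD_counter]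

-- ===== VERDICT (by name: the statement is the Claim_ definition above) =====
theorem verifica_frequencia_spec : Claim_equal_verifica_frequencia := by
  intro arr1 arr2 _
  unfold Spec_verifica_frequencia verifica_frequencia verifica_frequencia_alt
  simp only [PySem.List.foldl_append_singleton_eq_map, List.nil_append]
  apply List.map_congr_left
  intro m _
  rw [a_doc, b_doc]
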